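-- pv_equiv track=rewrite | github.com/myrobot2020/dama-mob | scripts2/09_names.py | inject_after_sutta_id
-- ===== SOURCE A (Python) =====
-- def inject_after_sutta_id(obj: dict, en: str, pali: str) -> dict:
--     """Insert sutta_name_en / sutta_name_pali immediately after sutta_id; drop stale copies."""
--     if "sutta_id" not in obj:
--         return obj
--     new: dict = {}
--     for k, v in obj.items():
--         if k in ("sutta_name_en", "sutta_name_pali"):
--             continue
--         new[k] = v
--         if k == "sutta_id":
--             new["sutta_name_en"] = en
--             new["sutta_name_pali"] = pali
--     return new
-- ===== SOURCE B (Python) =====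
-- def inject_after_sutta_id(obj: dict, en: str, pali: str) -> dict:
--     """Insert sutta_name_en / sutta_name_pali immediately after sutta_id; drop stale copies."""
--     if "sutta_id" not in obj:
--         return obj
--     items = [(k, v) for k, v in obj.items() if k not in ("sutta_name_en", "sutta_name_pali")]
--     i = next(j for j, (k, _) in enumerate(items) if k == "sutta_id")
--     return dict(items[:i + 1]
--                 + [("sutta_name_en", en), ("sutta_name_pali", pali)]
--                 + items[i + 1:])
-- ===== Notes on version B (the rewrite author's own statement) =====
-- stated objective: simpler
-- what changed: Replaces A's single streaming loop (skip old name keys, copy each pair, inject inside the loop body when sutta_id passes) by a declarative pipeline: filter out the old name keys once, locate sutta_id's index, and splice the two new pairs in with slicing and concatenation.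
import Mathlib
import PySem

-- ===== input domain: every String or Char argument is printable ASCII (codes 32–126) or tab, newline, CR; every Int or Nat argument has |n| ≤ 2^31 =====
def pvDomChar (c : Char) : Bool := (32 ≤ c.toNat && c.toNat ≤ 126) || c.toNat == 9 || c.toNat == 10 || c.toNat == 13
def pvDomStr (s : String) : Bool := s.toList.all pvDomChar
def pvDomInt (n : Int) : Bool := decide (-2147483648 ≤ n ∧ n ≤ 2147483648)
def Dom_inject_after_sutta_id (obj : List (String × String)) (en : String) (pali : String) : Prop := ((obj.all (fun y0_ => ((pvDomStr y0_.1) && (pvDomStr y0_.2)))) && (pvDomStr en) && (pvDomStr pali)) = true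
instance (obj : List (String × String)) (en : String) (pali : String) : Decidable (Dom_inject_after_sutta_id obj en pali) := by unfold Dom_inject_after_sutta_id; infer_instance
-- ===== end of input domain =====

-- B replaces A's single streaming loop (skip old name keys, copy, inject inside the loop body)
-- by a declarative pipeline — filter out the old name keys once, find sutta_id's index, splice the
-- two new pairs in by slicing + concatenation; objective: simpler. Equal return values on Pre_.


-- ===== PORT A =====
-- body of A's 'for k, v in obj.items(): …' (the dict 'new' is the accumulator)
def pvInjStep (en pali : String) (new : PySem.Dict String String) (kv : String × String) : PySem.Dict String String :=
  if kv.1 = "sutta_name_en" ∨ kv.1 = "sutta_name_pali" then new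
  else
    let new := new.insert kv.1 kv.2
    if kv.1 = "sutta_id" then (new.insert "sutta_name_en" en).insert "sutta_name_pali" pali
    else new

def inject_after_sutta_id (obj : List (String × String)) (en : String) (pali : String) : List (String × String) :=
  if (obj.any (fun kv => kv.1 == "sutta_id")) = false then obj
  else (obj.foldl (pvInjStep en pali) PySem.Dict.empty).items

-- ===== PORT B =====
-- 'k not in ("sutta_name_en", "sutta_name_pali")'
def pvNN (kv : String × String) : Bool := !(kv.1 == "sutta_name_en" || kv.1 == "sutta_name_pali")

def inject_after_sutta_id_alt (obj : List (String × String)) (en : String) (pali : String) : List (String × String) :=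
  if (obj.any (fun kv => kv.1 == "sutta_id")) = false then obj
  else
    let items := obj.filter pvNN
    let i := items.findIdx (fun kv => kv.1 == "sutta_id")
    (PySem.Dict.ofList (items.take (i + 1)
        ++ [("sutta_name_en", en), ("sutta_name_pali", pali)]
        ++ items.drop (i + 1))).items

-- ===== PRECONDITION & SPEC =====
-- Pre_ excludes association lists with duplicate keys: the Python argument is a dict, so such
-- lists represent no input the Python function ever receives.
def Pre_inject_after_sutta_id (obj : List (String × String)) (en : String) (pali : String) : Prop :=
  (obj.map Prod.fst).Nodup
instance (obj : List (String × String)) (en : String) (pali : String) : Decidable (Pre_inject_after_sutta_id obj en pali) := by unfold Pre_inject_after_sutta_id; infer_instance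

def pvWitness_inject_after_sutta_id : (List (String × String)) × String × String :=
  ([("sutta_id", "sn1.1"), ("sutta_name_en", "old"), ("body", "text")], "Greed", "Tanha")

def Spec_inject_after_sutta_id (obj : List (String × String)) (en : String) (pali : String) (out : List (String × String)) : Prop := out = inject_after_sutta_id_alt obj en pali
instance (obj : List (String × String)) (en : String) (pali : String) (out : List (String × String)) : Decidable (Spec_inject_after_sutta_id obj en pali out) := by unfold Spec_inject_after_sutta_id; infer_instance

-- ===== CLAIM (what is proved, stated in full; the proofs are below) =====
def Claim_equal_inject_after_sutta_id : Prop := ∀ (obj : List (String × String)) (en : String) (pali : String), Dom_inject_after_sutta_id obj en pali → Pre_inject_after_sutta_id obj en pali → Spec_inject_after_sutta_id obj en pali (inject_after_sutta_id obj en pali)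

-- ===== LEMMAS AND PROOFS =====

-- what A's loop produces, read off obj directly
def pvSpliceG (en pali : String) : List (String × String) → List (String × String)
  | [] => []
  | kv :: t =>
    if kv.1 = "sutta_name_en" ∨ kv.1 = "sutta_name_pali" then pvSpliceG en pali t
    else if kv.1 = "sutta_id" then
      kv :: ("sutta_name_en", en) :: ("sutta_name_pali", pali) :: t.filter pvNN
    else kv :: pvSpliceG en pali t

-- the same splice carried out on the already-filtered list
def pvSpliceH (en pali : String) : List (String × String) → List (String × String)
  | [] => []
  | kv :: t =>
    if kv.1 = "sutta_id" then kv :: ("sutta_name_en", en) :: ("sutta_name_pali", pali) :: t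
    else kv :: pvSpliceH en pali t

theorem pvContains_false_of_not_mem (d : PySem.Dict String String) (k : String)
    (h : k ∉ d.keys) : d.contains k = false := by
  rcases Bool.eq_false_or_eq_true (d.contains k) with hb | hb
  · exact absurd ((PySem.Dict.contains_iff_mem_keys d k).mp hb) h
  · exact hb

-- A's loop over a stretch that contains no 'sutta_id' just copies the non-name pairs
theorem pvFold_no_sid (en pali : String) (l : List (String × String)) (d : PySem.Dict String String)
    (hs : "sutta_id" ∉ l.map Prod.fst) (hn : (l.map Prod.fst).Nodup)
    (hd : ∀ kv ∈ l, pvNN kv = true → kv.1 ∉ d.keys) :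
    (l.foldl (pvInjStep en pali) d).items = d.items ++ l.filter pvNN := by
  induction l generalizing d with
  | nil => simp
  | cons kv t iht =>
    rw [List.map_cons] at hs hn
    have hs1 : ¬ (kv.1 = "sutta_id") := fun h => hs (by rw [← h]; exact List.mem_cons_self)
    have hs2 : "sutta_id" ∉ t.map Prod.fst := fun h => hs (List.mem_cons_of_mem _ h)
    have hn1 : kv.1 ∉ t.map Prod.fst := (List.nodup_cons.mp hn).1
    have hn2 := (List.nodup_cons.mp hn).2
    simp only [List.foldl_cons]
    by_cases h : kv.1 = "sutta_name_en" ∨ kv.1 = "sutta_name_pali"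
    · have hnn : pvNN kv = false := by simp only [pvNN]; simp; tauto
      rw [pvInjStep, if_pos h, List.filter_cons, hnn]
      exact iht d hs2 hn2 (fun kv' hm hp => hd kv' (List.mem_cons_of_mem _ hm) hp)
    · have hnn : pvNN kv = true := by simp only [pvNN]; simp at h ⊢; tauto
      have hfree : kv.1 ∉ d.keys := hd kv List.mem_cons_self hnn
      have hcf : d.contains kv.1 = false := pvContains_false_of_not_mem d kv.1 hfree
      rw [pvInjStep, if_neg h]
      simp only [if_neg hs1]
      rw [iht (d.insert kv.1 kv.2) hs2 hn2 ?_]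
      · rw [PySem.Dict.items_insert_of_not_contains d kv.2 hcf, List.filter_cons, hnn]
        simp
      · intro kv' hm hp hk
        rw [PySem.Dict.keys_insert_of_not_contains d kv.2 hcf] at hk
        rcases List.mem_append.mp hk with hk | hk
        · exact hd kv' (List.mem_cons_of_mem _ hm) hp hk
        · have : kv'.1 = kv.1 := by simpa using hk
          exact hn1 (this ▸ List.mem_map_of_mem hm)

-- A's whole loop produces pvSpliceG
theorem pvFold_main (en pali : String) (l : List (String × String)) (d : PySem.Dict String String)
    (hn : (l.map Prod.fst).Nodup)
    (hd : ∀ kv ∈ l, pvNN kv = true → kv.1 ∉ d.keys)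
    (hm : "sutta_id" ∈ l.map Prod.fst → "sutta_name_en" ∉ d.keys ∧ "sutta_name_pali" ∉ d.keys) :
    (l.foldl (pvInjStep en pali) d).items = d.items ++ pvSpliceG en pali l := by
  induction l generalizing d with
  | nil => simp [pvSpliceG]
  | cons kv t iht =>
    rw [List.map_cons] at hn
    have hn1 : kv.1 ∉ t.map Prod.fst := (List.nodup_cons.mp hn).1
    have hn2 := (List.nodup_cons.mp hn).2
    simp only [List.foldl_cons]
    by_cases h : kv.1 = "sutta_name_en" ∨ kv.1 = "sutta_name_pali"
    · rw [pvInjStep, if_pos h, pvSpliceG, if_pos h]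
      exact iht d hn2 (fun kv' hm' hp => hd kv' (List.mem_cons_of_mem _ hm') hp)
        (fun hsid => hm (by rw [List.map_cons]; exact List.mem_cons_of_mem _ hsid))
    · have hnn : pvNN kv = true := by simp only [pvNN]; simp at h ⊢; tauto
      have hfree : kv.1 ∉ d.keys := hd kv List.mem_cons_self hnn
      have hcf : d.contains kv.1 = false := pvContains_false_of_not_mem d kv.1 hfree
      rw [pvInjStep, if_neg h]
      by_cases hs : kv.1 = "sutta_id"
      · have hsid : "sutta_id" ∈ (kv :: t).map Prod.fst := by
          rw [List.map_cons, ← hs]; exact List.mem_cons_self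
        have hke : "sutta_name_en" ∉ d.keys := (hm hsid).1
        have hkp : "sutta_name_pali" ∉ d.keys := (hm hsid).2
        have hk1 : (d.insert kv.1 kv.2).keys = d.keys ++ [kv.1] :=
          PySem.Dict.keys_insert_of_not_contains d kv.2 hcf
        have hcf2 : (d.insert kv.1 kv.2).contains "sutta_name_en" = false := by
          apply pvContains_false_of_not_mem
          rw [hk1]
          intro hmem
          rcases List.mem_append.mp hmem with hmem | hmem
          · exact hke hmem
          · rw [hs] at hmem; simp at hmem
        have hk2 : ((d.insert kv.1 kv.2).insert "sutta_name_en" en).keys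
            = d.keys ++ [kv.1] ++ ["sutta_name_en"] := by
          rw [PySem.Dict.keys_insert_of_not_contains _ en hcf2, hk1]
        have hcf3 : ((d.insert kv.1 kv.2).insert "sutta_name_en" en).contains "sutta_name_pali" = false := by
          apply pvContains_false_of_not_mem
          rw [hk2]
          intro hmem
          rcases List.mem_append.mp hmem with hmem | hmem
          · rcases List.mem_append.mp hmem with hmem | hmem
            · exact hkp hmem
            · rw [hs] at hmem; simp at hmem
          · simp at hmem
        have hk3 : (((d.insert kv.1 kv.2).insert "sutta_name_en" en).insert "sutta_name_pali" pali).keys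
            = d.keys ++ [kv.1] ++ ["sutta_name_en"] ++ ["sutta_name_pali"] := by
          rw [PySem.Dict.keys_insert_of_not_contains _ pali hcf3, hk2]
        simp only [if_pos hs]
        rw [pvFold_no_sid en pali t _ (hs ▸ hn1) hn2 ?_]
        · rw [PySem.Dict.items_insert_of_not_contains _ pali hcf3,
              PySem.Dict.items_insert_of_not_contains _ en hcf2,
              PySem.Dict.items_insert_of_not_contains d kv.2 hcf,
              pvSpliceG, if_neg h, if_pos hs]
          simp
        · intro kv' hm' hp hk
          rw [hk3] at hk
          have hp' : ¬ (kv'.1 = "sutta_name_en" ∨ kv'.1 = "sutta_name_pali") := by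
            simp only [pvNN] at hp; simp at hp ⊢; tauto
          rcases List.mem_append.mp hk with hk | hk
          · rcases List.mem_append.mp hk with hk | hk
            · rcases List.mem_append.mp hk with hk | hk
              · exact hd kv' (List.mem_cons_of_mem _ hm') hp hk
              · have : kv'.1 = kv.1 := by simpa using hk
                exact hn1 (this ▸ List.mem_map_of_mem hm')
            · exact hp' (Or.inl (by simpa using hk))
          · exact hp' (Or.inr (by simpa using hk))
      · simp only [if_neg hs]
        rw [iht (d.insert kv.1 kv.2) hn2 ?_ ?_]
        · rw [PySem.Dict.items_insert_of_not_contains d kv.2 hcf,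
              pvSpliceG, if_neg h, if_neg hs]
          simp
        · intro kv' hm' hp hk
          rw [PySem.Dict.keys_insert_of_not_contains d kv.2 hcf] at hk
          rcases List.mem_append.mp hk with hk | hk
          · exact hd kv' (List.mem_cons_of_mem _ hm') hp hk
          · have : kv'.1 = kv.1 := by simpa using hk
            exact hn1 (this ▸ List.mem_map_of_mem hm')
        · intro hsid
          have hmm := hm (by rw [List.map_cons]; exact List.mem_cons_of_mem _ hsid)
          rw [PySem.Dict.keys_insert_of_not_contains d kv.2 hcf]
          constructor
          · intro hk
            rcases List.mem_append.mp hk with hk | hk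
            · exact hmm.1 hk
            · have he : "sutta_name_en" = kv.1 := by simpa using hk
              exact h (Or.inl he.symm)
          · intro hk
            rcases List.mem_append.mp hk with hk | hk
            · exact hmm.2 hk
            · have he : "sutta_name_pali" = kv.1 := by simpa using hk
              exact h (Or.inr he.symm)

theorem pvSpliceG_eq (en pali : String) (l : List (String × String)) :
    pvSpliceG en pali l = pvSpliceH en pali (l.filter pvNN) := by
  induction l with
  | nil => rfl
  | cons kv t ih =>
    by_cases h : kv.1 = "sutta_name_en" ∨ kv.1 = "sutta_name_pali"
    · have hnn : pvNN kv = false := by simp only [pvNN]; simp; tauto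
      simp [pvSpliceG, h, hnn, ih]
    · have hnn : pvNN kv = true := by simp only [pvNN]; simp at h ⊢; tauto
      by_cases hs : kv.1 = "sutta_id"
      · simp [pvSpliceG, hs, hnn, pvSpliceH]
      · simp [pvSpliceG, h, hs, hnn, pvSpliceH, ih]

theorem pvSpliceH_splice (en pali : String) (m : List (String × String))
    (h : "sutta_id" ∈ m.map Prod.fst) :
    m.take (m.findIdx (fun kv => kv.1 == "sutta_id") + 1)
      ++ [("sutta_name_en", en), ("sutta_name_pali", pali)]
      ++ m.drop (m.findIdx (fun kv => kv.1 == "sutta_id") + 1)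
    = pvSpliceH en pali m := by
  induction m with
  | nil => simp at h
  | cons kv t ih =>
    by_cases hs : kv.1 = "sutta_id"
    · simp [List.findIdx_cons, hs, pvSpliceH]
    · have ht : "sutta_id" ∈ t.map Prod.fst := by
        rcases (by simpa using h : "sutta_id" = kv.1 ∨ "sutta_id" ∈ t.map Prod.fst) with h' | h'
        · exact absurd h'.symm hs
        · exact h'
      simp [List.findIdx_cons, hs, pvSpliceH, Bool.cond_eq_ite, ← ih ht]

theorem pvSpliceH_keys_sub (en pali : String) (m : List (String × String)) (x : String)
    (hx : x ∈ (pvSpliceH en pali m).map Prod.fst) :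
    x ∈ m.map Prod.fst ∨ x = "sutta_name_en" ∨ x = "sutta_name_pali" := by
  induction m with
  | nil => simp [pvSpliceH] at hx
  | cons kv t ih =>
    by_cases hs : kv.1 = "sutta_id"
    · simp only [pvSpliceH, if_pos hs, List.map_cons, List.mem_cons] at hx ⊢
      tauto
    · simp only [pvSpliceH, if_neg hs, List.map_cons, List.mem_cons] at hx ⊢
      rcases hx with h | h
      · tauto
      · rcases ih h with h' | h' <;> tauto

theorem pvSpliceH_keys_nodup (en pali : String) (m : List (String × String))
    (hn : (m.map Prod.fst).Nodup)
    (hne : "sutta_name_en" ∉ m.map Prod.fst) (hnp : "sutta_name_pali" ∉ m.map Prod.fst) :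
    ((pvSpliceH en pali m).map Prod.fst).Nodup := by
  induction m with
  | nil => simp [pvSpliceH]
  | cons kv t ih =>
    rw [List.map_cons] at hn hne hnp
    have hn1 : kv.1 ∉ t.map Prod.fst := (List.nodup_cons.mp hn).1
    have hn2 := (List.nodup_cons.mp hn).2
    have hne1 : ¬ ("sutta_name_en" = kv.1) := fun h => hne (by rw [h]; exact List.mem_cons_self)
    have hne2 : "sutta_name_en" ∉ t.map Prod.fst := fun h => hne (List.mem_cons_of_mem _ h)
    have hnp1 : ¬ ("sutta_name_pali" = kv.1) := fun h => hnp (by rw [h]; exact List.mem_cons_self)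
    have hnp2 : "sutta_name_pali" ∉ t.map Prod.fst := fun h => hnp (List.mem_cons_of_mem _ h)
    by_cases hs : kv.1 = "sutta_id"
    · simp only [pvSpliceH, if_pos hs, List.map_cons, List.nodup_cons, List.mem_cons]
      refine ⟨?_, ⟨?_, ⟨hnp2, hn2⟩⟩⟩
      · rintro (h | h | h)
        · exact hne1 h.symm
        · exact hnp1 h.symm
        · exact hn1 h
      · rintro (h | h)
        · exact absurd h (by decide)
        · exact hne2 h
    · simp only [pvSpliceH, if_neg hs, List.map_cons, List.nodup_cons]
      refine ⟨?_, ih hn2 hne2 hnp2⟩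
      intro hx
      rcases pvSpliceH_keys_sub en pali t kv.1 hx with h' | h' | h'
      · exact hn1 h'
      · exact hne1 h'.symm
      · exact hnp1 h'.symm

theorem pvOfList_items (m : List (String × String)) (hn : (m.map Prod.fst).Nodup) :
    (PySem.Dict.ofList m).items = m := by
  have h := PySem.Dict.items_foldl_insert_fresh m Prod.fst Prod.snd PySem.Dict.empty
    (fun a _ => PySem.Dict.contains_empty _) hn
  simpa [PySem.Dict.ofList, PySem.Dict.update] using h

-- ===== VERDICT (by name: the statement is the Claim_ definition above) =====
theorem inject_after_sutta_id_spec : Claim_equal_inject_after_sutta_id := by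
  intro obj en pali _ hpre
  unfold Spec_inject_after_sutta_id inject_after_sutta_id inject_after_sutta_id_alt
  by_cases hany : (obj.any (fun kv => kv.1 == "sutta_id")) = false
  · simp [hany]
  · have hT : obj.any (fun kv => kv.1 == "sutta_id") = true := by
      rcases Bool.eq_false_or_eq_true (obj.any (fun kv => kv.1 == "sutta_id")) with hb | hb
      · exact hb
      · exact absurd hb hany
    obtain ⟨kv, hkm, hke⟩ := List.any_eq_true.mp hT
    have hks : kv.1 = "sutta_id" := by simpa using hke
    have hknn : pvNN kv = true := by simp [pvNN, hks]
    have hfn : ((obj.filter pvNN).map Prod.fst).Nodup :=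
      List.Nodup.sublist (List.Sublist.map Prod.fst (obj.filter_sublist)) hpre
    have hfe : "sutta_name_en" ∉ (obj.filter pvNN).map Prod.fst := by
      intro hmem
      obtain ⟨kv', hkv', he⟩ := List.mem_map.mp hmem
      have := (List.mem_filter.mp hkv').2
      rw [pvNN, he] at this
      simp at this
    have hfp : "sutta_name_pali" ∉ (obj.filter pvNN).map Prod.fst := by
      intro hmem
      obtain ⟨kv', hkv', he⟩ := List.mem_map.mp hmem
      have := (List.mem_filter.mp hkv').2
      rw [pvNN, he] at this
      simp at this
    have hsidf : "sutta_id" ∈ (obj.filter pvNN).map Prod.fst :=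
      hks ▸ List.mem_map_of_mem (List.mem_filter.mpr ⟨hkm, hknn⟩)
    simp only [hT]
    rw [pvFold_main en pali obj PySem.Dict.empty hpre
          (fun kv' _ _ => by simp [PySem.Dict.keys_empty])
          (fun _ => by simp [PySem.Dict.keys_empty]),
        pvSpliceG_eq, pvSpliceH_splice en pali _ hsidf,
        pvOfList_items _ (pvSpliceH_keys_nodup en pali _ hfn hfe hfp)]
    rfl
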